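-- pv_equiv track=rewrite | github.com/cactus-compute/voice-agents-hack | Ali/intent/file_resolve.py | _preferred_extensions
-- ===== SOURCE A (Python) =====
-- _DOCUMENT_EXTS = (".pdf", ".docx", ".doc", ".pages", ".rtf", ".txt", ".md")
--
-- _SPREADSHEET_EXTS = (".xlsx", ".xls", ".numbers", ".csv")
--
-- _SLIDES_EXTS = (".pptx", ".ppt", ".key")
--
-- _IMAGE_EXTS = (".jpg", ".jpeg", ".png", ".gif", ".webp", ".heic", ".svg", ".tiff", ".bmp", ".ico")
--
-- _MEDIA_EXTS = (".mp4", ".mov", ".m4a", ".mp3", ".wav", ".mkv", ".webm", ".avi")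
--
-- def _preferred_extensions(role: str, query: str) -> tuple[tuple[str, ...], tuple[str, ...]]:
--     """Return (preferred, penalised) extension lists for this role/query."""
--     q = (query or "").lower()
--     if role == "deck" or any(w in q for w in ("deck", "presentation", "slides", "keynote")):
--         preferred = _SLIDES_EXTS + _DOCUMENT_EXTS
--         penalised = _IMAGE_EXTS + _MEDIA_EXTS
--     elif any(w in q for w in ("spreadsheet", "excel", "csv", "numbers")):
--         preferred = _SPREADSHEET_EXTS + _DOCUMENT_EXTS
--         penalised = _IMAGE_EXTS + _MEDIA_EXTS
--     elif any(w in q for w in ("image", "photo", "picture", "icon", "logo", "screenshot")):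
--         preferred = _IMAGE_EXTS
--         penalised = ()
--     elif any(w in q for w in ("video", "movie", "recording", "clip")):
--         preferred = _MEDIA_EXTS
--         penalised = ()
--     else:
--         preferred = _DOCUMENT_EXTS + _SPREADSHEET_EXTS + _SLIDES_EXTS
--         penalised = _IMAGE_EXTS + _MEDIA_EXTS
--     return preferred, penalised
-- ===== SOURCE B (Python) =====
-- _DOCUMENT_EXTS = (".pdf", ".docx", ".doc", ".pages", ".rtf", ".txt", ".md")
--
-- _SPREADSHEET_EXTS = (".xlsx", ".xls", ".numbers", ".csv")
--
-- _SLIDES_EXTS = (".pptx", ".ppt", ".key")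
--
-- _IMAGE_EXTS = (".jpg", ".jpeg", ".png", ".gif", ".webp", ".heic", ".svg", ".tiff", ".bmp", ".ico")
--
-- _MEDIA_EXTS = (".mp4", ".mov", ".m4a", ".mp3", ".wav", ".mkv", ".webm", ".avi")
--
-- # Each keyword is tagged with the priority (= index) of the rule it triggers.
-- _KEYWORD_PRIORITY = (
--     ("deck", 0), ("presentation", 0), ("slides", 0), ("keynote", 0),
--     ("spreadsheet", 1), ("excel", 1), ("csv", 1), ("numbers", 1),
--     ("image", 2), ("photo", 2), ("picture", 2), ("icon", 2), ("logo", 2), ("screenshot", 2),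
--     ("video", 3), ("movie", 3), ("recording", 3), ("clip", 3),
-- )
--
-- # (preferred, penalised) per priority; the last entry is the default.
-- _RESULTS = (
--     (_SLIDES_EXTS + _DOCUMENT_EXTS, _IMAGE_EXTS + _MEDIA_EXTS),
--     (_SPREADSHEET_EXTS + _DOCUMENT_EXTS, _IMAGE_EXTS + _MEDIA_EXTS),
--     (_IMAGE_EXTS, ()),
--     (_MEDIA_EXTS, ()),
--     (_DOCUMENT_EXTS + _SPREADSHEET_EXTS + _SLIDES_EXTS, _IMAGE_EXTS + _MEDIA_EXTS),
-- )
--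
-- def _preferred_extensions(role: str, query: str) -> tuple[tuple[str, ...], tuple[str, ...]]:
--     """Return (preferred, penalised) extension lists for this role/query."""
--     q = (query or "").lower()
--     if role == "deck":
--         pri = 0
--     else:
--         pri = min((p for kw, p in _KEYWORD_PRIORITY if kw in q),
--                   default=len(_RESULTS) - 1)
--     return _RESULTS[pri]
-- ===== Notes on version B (the rewrite author's own statement) =====
-- stated objective: alternative
-- what changed: Replaces the if-elif cascade of any() scans with a flat keyword->priority table folded to the minimum matched priority, which then indexes a results table (plus the role=='deck' short-circuit).
import Mathlib
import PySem

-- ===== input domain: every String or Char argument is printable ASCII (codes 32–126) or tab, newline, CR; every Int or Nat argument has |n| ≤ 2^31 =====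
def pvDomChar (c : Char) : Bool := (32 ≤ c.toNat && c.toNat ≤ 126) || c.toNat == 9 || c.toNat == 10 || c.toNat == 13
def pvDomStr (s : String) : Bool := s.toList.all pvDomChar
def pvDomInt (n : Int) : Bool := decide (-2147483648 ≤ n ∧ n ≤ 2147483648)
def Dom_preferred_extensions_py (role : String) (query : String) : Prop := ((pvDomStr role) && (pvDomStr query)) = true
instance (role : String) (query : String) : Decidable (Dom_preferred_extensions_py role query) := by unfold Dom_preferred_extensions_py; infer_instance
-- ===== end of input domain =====

-- B replaces A's if-elif cascade by a flat keyword->priority table folded to the minimum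
-- matched priority indexing a results table (objective: alternative decomposition, same cost).

-- ===== PORT A =====
def pvDocExts : List String := [".pdf", ".docx", ".doc", ".pages", ".rtf", ".txt", ".md"]
def pvSpreadsheetExts : List String := [".xlsx", ".xls", ".numbers", ".csv"]
def pvSlidesExts : List String := [".pptx", ".ppt", ".key"]
def pvImageExts : List String := [".jpg", ".jpeg", ".png", ".gif", ".webp", ".heic", ".svg", ".tiff", ".bmp", ".ico"]
def pvMediaExts : List String := [".mp4", ".mov", ".m4a", ".mp3", ".wav", ".mkv", ".webm", ".avi"]

-- any(w in q for w in kws)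
def pvAnyIn (kws : List String) (q : String) : Bool := kws.any (fun w => PySem.Str.isIn w q)

def preferred_extensions_py (role : String) (query : String) : List String × List String :=
  let q := PySem.Str.lower query   -- (query or "").lower() = query.lower() for strings
  if role == "deck" || pvAnyIn ["deck", "presentation", "slides", "keynote"] q then
    (pvSlidesExts ++ pvDocExts, pvImageExts ++ pvMediaExts)
  else if pvAnyIn ["spreadsheet", "excel", "csv", "numbers"] q then
    (pvSpreadsheetExts ++ pvDocExts, pvImageExts ++ pvMediaExts)
  else if pvAnyIn ["image", "photo", "picture", "icon", "logo", "screenshot"] q then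
    (pvImageExts, [])
  else if pvAnyIn ["video", "movie", "recording", "clip"] q then
    (pvMediaExts, [])
  else
    (pvDocExts ++ pvSpreadsheetExts ++ pvSlidesExts, pvImageExts ++ pvMediaExts)

-- ===== PORT B =====
def pvKeywordPriority : List (String × Nat) :=
  [("deck", 0), ("presentation", 0), ("slides", 0), ("keynote", 0),
   ("spreadsheet", 1), ("excel", 1), ("csv", 1), ("numbers", 1),
   ("image", 2), ("photo", 2), ("picture", 2), ("icon", 2), ("logo", 2), ("screenshot", 2),
   ("video", 3), ("movie", 3), ("recording", 3), ("clip", 3)]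

def pvResults : List (List String × List String) :=
  [(pvSlidesExts ++ pvDocExts, pvImageExts ++ pvMediaExts),
   (pvSpreadsheetExts ++ pvDocExts, pvImageExts ++ pvMediaExts),
   (pvImageExts, []),
   (pvMediaExts, []),
   (pvDocExts ++ pvSpreadsheetExts ++ pvSlidesExts, pvImageExts ++ pvMediaExts)]

def preferred_extensions_py_alt (role : String) (query : String) : List String × List String :=
  let q := PySem.Str.lower query
  let pri : Nat :=
    if role == "deck" then 0
    else
      -- min(p for matched keywords, default = len(_RESULTS) - 1), as a fold
      pvKeywordPriority.foldl
        (fun best kp => if PySem.Str.isIn kp.1 q then min best kp.2 else best)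
        (pvResults.length - 1)
  pvResults.getD pri ([], [])

-- ===== PRECONDITION & SPEC =====
def Spec_preferred_extensions_py (role : String) (query : String) (out : List String × List String) : Prop := out = preferred_extensions_py_alt role query
instance (role : String) (query : String) (out : List String × List String) : Decidable (Spec_preferred_extensions_py role query out) := by unfold Spec_preferred_extensions_py; infer_instance

-- ===== CLAIM (what is proved, stated in full; the proofs are below) =====
def Claim_equal_preferred_extensions_py : Prop := ∀ (role : String) (query : String), Dom_preferred_extensions_py role query → Spec_preferred_extensions_py role query (preferred_extensions_py role query)

-- ===== LEMMAS AND PROOFS =====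

-- a group of keywords sharing one priority folds to 'min init p' iff any keyword matches
theorem pv_foldl_group (q : String) (p : Nat) (kws : List String) :
    ∀ init : Nat,
      (kws.map (fun w => (w, p))).foldl
        (fun best kp => if PySem.Str.isIn kp.1 q then min best kp.2 else best) init
      = if pvAnyIn kws q then min init p else init := by
  induction kws with
  | nil => intro init; simp [pvAnyIn]
  | cons k rest ih =>
    intro init
    rw [List.map_cons, List.foldl_cons, ih]
    have hchain : pvAnyIn (k :: rest) q = (PySem.Str.isIn k q || pvAnyIn rest q) := rfl
    rw [hchain]
    cases h : PySem.Str.isIn k q <;> cases h2 : pvAnyIn rest q <;>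
      simp

theorem pv_fold_priority (q : String) :
    pvKeywordPriority.foldl
      (fun best kp => if PySem.Str.isIn kp.1 q then min best kp.2 else best)
      (pvResults.length - 1)
    = if pvAnyIn ["deck", "presentation", "slides", "keynote"] q then 0
      else if pvAnyIn ["spreadsheet", "excel", "csv", "numbers"] q then 1
      else if pvAnyIn ["image", "photo", "picture", "icon", "logo", "screenshot"] q then 2
      else if pvAnyIn ["video", "movie", "recording", "clip"] q then 3
      else 4 := by
  have hsplit : pvKeywordPriority =
      (["deck", "presentation", "slides", "keynote"].map (fun w => (w, 0)))
      ++ (["spreadsheet", "excel", "csv", "numbers"].map (fun w => (w, 1)))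
      ++ (["image", "photo", "picture", "icon", "logo", "screenshot"].map (fun w => (w, 2)))
      ++ (["video", "movie", "recording", "clip"].map (fun w => (w, 3))) := by rfl
  rw [hsplit]
  rw [List.foldl_append, List.foldl_append, List.foldl_append]
  rw [pv_foldl_group, pv_foldl_group, pv_foldl_group, pv_foldl_group]
  cases h0 : pvAnyIn ["deck", "presentation", "slides", "keynote"] q <;>
  cases h1 : pvAnyIn ["spreadsheet", "excel", "csv", "numbers"] q <;>
  cases h2 : pvAnyIn ["image", "photo", "picture", "icon", "logo", "screenshot"] q <;>
  cases h3 : pvAnyIn ["video", "movie", "recording", "clip"] q <;>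
  simp [pvResults]

-- ===== VERDICT (by name: the statement is the Claim_ definition above) =====
theorem preferred_extensions_py_spec : Claim_equal_preferred_extensions_py := by
  intro role query _
  unfold Spec_preferred_extensions_py preferred_extensions_py preferred_extensions_py_alt
  dsimp only
  rw [pv_fold_priority]
  by_cases hr : role == "deck"
  · simp [hr, pvResults]
  · simp only [hr, Bool.false_or, Bool.false_eq_true, if_false]
    cases h0 : pvAnyIn ["deck", "presentation", "slides", "keynote"] (PySem.Str.lower query) <;>
    cases h1 : pvAnyIn ["spreadsheet", "excel", "csv", "numbers"] (PySem.Str.lower query) <;>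
    cases h2 : pvAnyIn ["image", "photo", "picture", "icon", "logo", "screenshot"] (PySem.Str.lower query) <;>
    cases h3 : pvAnyIn ["video", "movie", "recording", "clip"] (PySem.Str.lower query) <;>
    simp_all [pvResults]
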